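-- pv_equiv track=rewrite | github.com/wdhaines/tunatale-micro-demo | curriculum_generator.py | _parse_curriculum_days
-- ===== SOURCE A (Python) =====
-- def _parse_curriculum_days(curriculum_text):
--     """Parse the curriculum text into structured day-by-day content."""
--     # This is a simple parser - in a real implementation, you'd want to make this more robust
--     days = {}
--     current_day = None
--
--     for line in curriculum_text.split('\n'):
--         line = line.strip()
--         if line.lower().startswith('day '):
--             current_day = line.split(':')[0].strip()
--             days[current_day] = []
--         elif current_day and line:
--             days[current_day].append(line)
--
--     return days
-- ===== SOURCE B (Python) =====
-- def _parse_curriculum_days(curriculum_text):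
--     """Parse the curriculum text into structured day-by-day content."""
--     lines = [ln.strip() for ln in curriculum_text.split('\n')]
--     n = len(lines)
--     days = {}
--     idx = 0
--     # skip everything before the first header
--     while idx < n and not lines[idx].lower().startswith('day '):
--         idx += 1
--     # each header owns the segment of lines up to the next header
--     while idx < n:
--         key = lines[idx].split(':')[0].strip()
--         j = idx + 1
--         while j < n and not lines[j].lower().startswith('day '):
--             j += 1
--         days[key] = [ln for ln in lines[idx + 1:j] if ln]
--         idx = j
--     return days
-- ===== Notes on version B (the rewrite author's own statement) =====
-- stated objective: alternative
-- what changed: A's single accumulator pass with a running current_day is replaced by a segment decomposition: strip all lines once, skip to the first header, then for each header slice its segment of lines up to the next header and store the non-empty ones under its key (later duplicate headers overwrite).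
import Mathlib
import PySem

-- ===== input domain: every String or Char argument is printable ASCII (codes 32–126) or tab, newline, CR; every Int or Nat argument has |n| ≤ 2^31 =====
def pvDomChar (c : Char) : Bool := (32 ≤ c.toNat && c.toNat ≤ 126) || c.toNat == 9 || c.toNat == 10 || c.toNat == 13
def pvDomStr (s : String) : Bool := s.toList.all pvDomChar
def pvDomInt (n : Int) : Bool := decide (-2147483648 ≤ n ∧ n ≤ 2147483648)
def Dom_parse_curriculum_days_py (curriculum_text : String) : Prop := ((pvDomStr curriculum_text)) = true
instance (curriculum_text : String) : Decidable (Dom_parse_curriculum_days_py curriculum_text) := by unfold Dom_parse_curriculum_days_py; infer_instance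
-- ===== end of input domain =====

-- B replaces A's single accumulator pass (running current_day) by a segment decomposition: skip to the
-- first header, then slice out each header's segment of lines up to the next header; same return value.

-- ===== PORT A =====
-- shared helpers: both Pythons contain the literal tests `line.lower().startswith('day ')`
-- and `line.split(':')[0].strip()`
def pvIsHdr (s : String) : Bool := PySem.Str.startswith (PySem.Str.lower s) "day "

-- `line.split(':')[0].strip()`; the `none`/`""` fallbacks are unreachable (sep ≠ "", split never returns [])
def pvKeyOf (s : String) : String :=
  match PySem.Str.split? s ":" with
  | some parts => PySem.Str.strip (parts.headD "")
  | none => ""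

-- A's loop body after `line = line.strip()` (s is the stripped line); `days[current_day].append(line)`
-- is Dict.modify, whose default [] is unreachable since current_day was always inserted first
def pvBodyA (st : PySem.Dict String (List String) × Option String) (s : String) :
    PySem.Dict String (List String) × Option String :=
  if pvIsHdr s then
    let key := pvKeyOf s
    (st.1.insert key [], some key)
  else
    match st.2 with
    | some c => if c ≠ "" ∧ s ≠ "" then (st.1.modify c [] (fun v => v ++ [s]), st.2) else st
    | none => st

def parse_curriculum_days_py (curriculum_text : String) : List (String × List String) :=
  -- for line in curriculum_text.split('\n'): line = line.strip(); …
  ((((PySem.Str.split? curriculum_text "\n").getD []).foldl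
      (fun st line => pvBodyA st (PySem.Str.strip line))
      (PySem.Dict.empty, none)).1).items

-- ===== PORT B =====
-- outer `while idx < n` of Source B: lines[idx] (= hd) is a header; the inner `while j < n and not …`
-- scan plus the slice lines[idx+1:j] is the takeWhile/dropWhile split of the tail
def pvAltGo : List String → PySem.Dict String (List String) → PySem.Dict String (List String)
  | [], days => days
  | hd :: rest, days =>
      let block := rest.takeWhile (fun x => !pvIsHdr x)
      pvAltGo (rest.dropWhile (fun x => !pvIsHdr x))
        (days.insert (pvKeyOf hd) (block.filter (fun x => x ≠ "")))
termination_by l => l.length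
decreasing_by exact Nat.lt_succ_of_le (List.length_dropWhile_le _ _)

def parse_curriculum_days_py_alt (curriculum_text : String) : List (String × List String) :=
  let lines := ((PySem.Str.split? curriculum_text "\n").getD []).map PySem.Str.strip
  -- first while loop of Source B: skip everything before the first header
  (pvAltGo (lines.dropWhile (fun x => !pvIsHdr x)) PySem.Dict.empty).items

-- ===== PRECONDITION & SPEC =====
def Spec_parse_curriculum_days_py (curriculum_text : String) (out : List (String × List String)) : Prop := out = parse_curriculum_days_py_alt curriculum_text
instance (curriculum_text : String) (out : List (String × List String)) : Decidable (Spec_parse_curriculum_days_py curriculum_text out) := by unfold Spec_parse_curriculum_days_py; infer_instance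

-- ===== CLAIM (what is proved, stated in full; the proofs are below) =====
def Claim_equal_parse_curriculum_days_py : Prop := ∀ (curriculum_text : String), Dom_parse_curriculum_days_py curriculum_text → Spec_parse_curriculum_days_py curriculum_text (parse_curriculum_days_py curriculum_text)

-- ===== LEMMAS AND PROOFS =====

-- whitespace characters are not uppercase letters, so lowerChar fixes them
theorem pv_lowerChar_of_isspace (c : Char) (h : PySem.Chars.isspace c = true) :
    PySem.Chars.lowerChar c = c := by
  have hu : PySem.Chars.isupper c = false := by
    simp only [PySem.Chars.isspace, Bool.or_eq_true, Bool.and_eq_true, decide_eq_true_eq] at h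
    simp only [PySem.Chars.isupper, Bool.and_eq_false_iff, decide_eq_false_iff_not, Char.le_def,
      UInt32.le_iff_toNat_le, show ('A').val.toNat = 65 from rfl, show ('Z').val.toNat = 90 from rfl,
      show c.val.toNat = c.toNat from rfl]
    omega
  simp [PySem.Chars.lowerChar, hu]

theorem pv_not_isspace_of_lower_d (c : Char) (h : PySem.Chars.lowerChar c = 'd') :
    PySem.Chars.isspace c = false := by
  by_cases hs : PySem.Chars.isspace c = true
  · rw [pv_lowerChar_of_isspace c hs] at h
    subst h
    exact absurd hs (by decide)
  · exact Bool.eq_false_iff.mpr hs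

-- splitOn.go with a nonempty accumulator: the result starts with the accumulator's last element
theorem pv_go_acc (sep : List Char) :
    ∀ (fuel : Nat) (l cur a : List Char) (acc : List (List Char)),
      ∃ as, PySem.Chars.splitOn.go sep fuel l cur (acc ++ [a]) = a :: as := by
  intro fuel
  induction fuel with
  | zero =>
    intro l cur a acc
    exact ⟨acc.reverse ++ [cur.reverse ++ l], by simp [PySem.Chars.splitOn.go]⟩
  | succ n ih =>
    intro l cur a acc
    match l with
    | [] => exact ⟨acc.reverse ++ [cur.reverse], by simp [PySem.Chars.splitOn.go]⟩
    | c :: rest =>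
      by_cases hp : sep.isPrefixOf (c :: rest) = true
      · rcases ih (List.drop sep.length (c :: rest)) [] a ((cur.reverse :: acc)) with ⟨as, hr⟩
        refine ⟨as, ?_⟩
        rw [show PySem.Chars.splitOn.go sep (n+1) (c :: rest) cur (acc ++ [a]) =
              PySem.Chars.splitOn.go sep n (List.drop sep.length (c :: rest)) []
                ((cur.reverse :: acc) ++ [a]) by simp [PySem.Chars.splitOn.go, hp]]
        exact hr
      · rcases ih rest (c :: cur) a acc with ⟨as, hr⟩
        refine ⟨as, ?_⟩
        rw [show PySem.Chars.splitOn.go sep (n+1) (c :: rest) cur (acc ++ [a]) =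
              PySem.Chars.splitOn.go sep n rest (c :: cur) (acc ++ [a]) by
                simp [PySem.Chars.splitOn.go, hp]]
        exact hr

-- splitOn.go with empty accumulator: the first chunk extends cur.reverse
theorem pv_go_acc_nil (sep : List Char) :
    ∀ (fuel : Nat) (l cur : List Char),
      ∃ r as, PySem.Chars.splitOn.go sep fuel l cur [] = (cur.reverse ++ r) :: as := by
  intro fuel
  induction fuel with
  | zero => intro l cur; exact ⟨l, [], by simp [PySem.Chars.splitOn.go]⟩
  | succ n ih =>
    intro l cur
    match l with
    | [] => exact ⟨[], [], by simp [PySem.Chars.splitOn.go]⟩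
    | c :: rest =>
      by_cases hp : sep.isPrefixOf (c :: rest) = true
      · rcases pv_go_acc sep n (List.drop sep.length (c :: rest)) [] cur.reverse [] with ⟨as, hr⟩
        refine ⟨[], as, ?_⟩
        rw [show PySem.Chars.splitOn.go sep (n+1) (c :: rest) cur [] =
              PySem.Chars.splitOn.go sep n (List.drop sep.length (c :: rest)) [] ([] ++ [cur.reverse]) by
                simp [PySem.Chars.splitOn.go, hp]]
        rw [hr]; simp
      · rcases ih rest (c :: cur) with ⟨r, as, hr⟩
        refine ⟨c :: r, as, ?_⟩
        rw [show PySem.Chars.splitOn.go sep (n+1) (c :: rest) cur [] =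
              PySem.Chars.splitOn.go sep n rest (c :: cur) [] by
                simp [PySem.Chars.splitOn.go, hp]]
        rw [hr]; simp

-- a header line's key `line.split(':')[0].strip()` is never the empty string
theorem pv_key_ne (s : String) (h : pvIsHdr s = true) : pvKeyOf s ≠ "" := by
  unfold pvIsHdr at h
  rw [PySem.Str.startswith_eq, PySem.Str.toList_lower] at h
  rw [PySem.Chars.startswith_iff] at h
  rcases h with ⟨u, hu⟩
  unfold PySem.Chars.lower at hu
  match hs : s.toList, hu' : hu with
  | [], _ => simp [hs] at hu
  | c1 :: rest, _ =>
    rw [hs] at hu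
    simp only [List.map_cons, show ("day ").toList = ['d','a','y',' '] from rfl, List.cons_append,
      List.cons.injEq] at hu
    have hd : PySem.Chars.lowerChar c1 = 'd' := hu.1.symm
    have hc1 : ¬ ((':' == c1) = true) := by
      intro hb
      rw [← eq_of_beq hb] at hd
      exact absurd hd (by decide)
    have hns : PySem.Chars.isspace c1 = false := pv_not_isspace_of_lower_d c1 hd
    rcases pv_go_acc_nil [':'] (rest.length + 1) rest [c1] with ⟨r, as, hgo⟩
    have hsplit : PySem.Chars.splitOn s.toList [':'] = (c1 :: r) :: as := by
      rw [hs]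
      unfold PySem.Chars.splitOn
      rw [show (c1 :: rest).length + 1 = (rest.length + 1) + 1 by simp]
      rw [show PySem.Chars.splitOn.go [':'] ((rest.length + 1)+1) (c1 :: rest) [] [] =
            PySem.Chars.splitOn.go [':'] (rest.length + 1) rest [c1] [] by
              simp [PySem.Chars.splitOn.go, List.isPrefixOf, hc1]]
      rw [hgo]; simp
    unfold pvKeyOf
    rw [show PySem.Str.split? s ":" =
          some ((PySem.Chars.splitOn s.toList [':']).map String.ofList) by
            simp [PySem.Str.split?, PySem.Chars.split?, show (":").toList = [':'] from rfl]]
    rw [hsplit]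
    simp only [List.map_cons, List.headD_cons]
    intro hemp
    have hl : (PySem.Str.strip (String.ofList (c1 :: r))).toList = [] := by rw [hemp]; rfl
    rw [PySem.Str.toList_strip, String.toList_ofList] at hl
    unfold PySem.Chars.strip at hl
    rw [show PySem.Chars.lstrip (c1 :: r) = c1 :: r by
          simp [PySem.Chars.lstrip, List.dropWhile_cons_of_neg, hns]] at hl
    unfold PySem.Chars.rstrip at hl
    rw [List.reverse_eq_nil_iff, List.dropWhile_eq_nil_iff] at hl
    have hsp := hl c1 (by simp)
    rw [hns] at hsp
    exact absurd hsp (by decide)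

-- the empty line is not a header
theorem pv_isHdr_empty : pvIsHdr "" = false := by decide

-- appending to the current day's list: modify after insert is insert of the appended list
theorem pv_modify_insert (d : PySem.Dict String (List String)) (c : String)
    (acc : List String) (f : List String → List String) :
    (d.insert c acc).modify c [] f = d.insert c (f acc) := by
  unfold PySem.Dict.modify
  rw [PySem.Dict.getD_insert_self, PySem.Dict.insert_insert_self]

-- A's loop from the middle of a segment (current day c, its list so far acc) equals B's
-- segment decomposition of the remaining lines
theorem pv_loop_some :
    ∀ (ls : List String) (c : String), c ≠ "" → ∀ (acc : List String)
      (d : PySem.Dict String (List String)),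
      (ls.foldl pvBodyA (d.insert c acc, some c)).1 =
        pvAltGo (ls.dropWhile (fun x => !pvIsHdr x))
          (d.insert c (acc ++ (ls.takeWhile (fun x => !pvIsHdr x)).filter (fun x => x ≠ ""))) := by
  intro ls
  induction ls with
  | nil => intro c hc acc d; simp [pvAltGo]
  | cons l ls ih =>
    intro c hc acc d
    by_cases hh : pvIsHdr l = true
    · have hstep : pvBodyA (d.insert c acc, some c) l =
          ((d.insert c acc).insert (pvKeyOf l) [], some (pvKeyOf l)) := by
        simp [pvBodyA, hh]
      rw [List.foldl_cons, hstep, ih (pvKeyOf l) (pv_key_ne l hh) [] (d.insert c acc)]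
      rw [List.dropWhile_cons_of_neg (by simp [hh]),
          List.takeWhile_cons_of_neg (by simp [hh])]
      simp [pvAltGo]
    · have hh' : pvIsHdr l = false := Bool.eq_false_iff.mpr hh
      rw [List.dropWhile_cons_of_pos (by simp [hh']),
          List.takeWhile_cons_of_pos (by simp [hh'])]
      by_cases he : l = ""
      · subst he
        have hstep : pvBodyA (d.insert c acc, some c) "" = (d.insert c acc, some c) := by
          simp [pvBodyA, pv_isHdr_empty]
        rw [List.foldl_cons, hstep, ih c hc acc d]
        simp
      · have hstep : pvBodyA (d.insert c acc, some c) l =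
            (d.insert c (acc ++ [l]), some c) := by
          simp only [pvBodyA, hh', Bool.false_eq_true, if_false]
          simp [hc, he, pv_modify_insert]
        rw [List.foldl_cons, hstep, ih c hc (acc ++ [l]) d]
        rw [List.filter_cons_of_pos (by simp [he])]
        simp

-- A's loop before any header is seen equals B on the tail after dropping the prefix
theorem pv_loop_none :
    ∀ (ls : List String) (d : PySem.Dict String (List String)),
      (ls.foldl pvBodyA (d, none)).1 = pvAltGo (ls.dropWhile (fun x => !pvIsHdr x)) d := by
  intro ls
  induction ls with
  | nil => intro d; simp [pvAltGo]
  | cons l ls ih =>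
    intro d
    by_cases hh : pvIsHdr l = true
    · have hstep : pvBodyA (d, none) l = (d.insert (pvKeyOf l) [], some (pvKeyOf l)) := by
        simp [pvBodyA, hh]
      rw [List.foldl_cons, hstep, pv_loop_some ls (pvKeyOf l) (pv_key_ne l hh) [] d]
      rw [List.dropWhile_cons_of_neg (by simp [hh])]
      simp [pvAltGo]
    · have hh' : pvIsHdr l = false := Bool.eq_false_iff.mpr hh
      have hstep : pvBodyA (d, none) l = (d, none) := by
        simp [pvBodyA, hh']
      rw [List.foldl_cons, hstep, ih d,
          List.dropWhile_cons_of_pos (by simp [hh'])]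

-- ===== VERDICT (by name: the statement is the Claim_ definition above) =====
theorem parse_curriculum_days_py_spec : Claim_equal_parse_curriculum_days_py := by
  intro t _
  unfold Spec_parse_curriculum_days_py parse_curriculum_days_py parse_curriculum_days_py_alt
  rw [← List.foldl_map (f := PySem.Str.strip) (g := pvBodyA)]
  rw [pv_loop_none]
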